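-- pv_equiv track=rewrite | github.com/sonjinhyuk/CSRC_training | Docscanner_parser/docscanner_parser/CSRC_parser/DocParser/regex_def.py | set_regex
-- ===== SOURCE A (Python) =====
-- def set_regex(_list, _type="HWP"):
--     return_list = []
--     if _type == "HWP":
--         nomal_regex = []
--         exec_list = []
--         scdbg_list = []
--         dhfa_keyword = []#domain, http, filepath, ascii
--
--         for keyword in _list:
--             if not(keyword == "domain" or keyword == "filepath" or keyword == "ascii"):
--                 if "string" in keyword or "putinterval" in keyword or "repeat" in keyword:
--                     scdbg_list.append(keyword)
--                 elif "exec|" in keyword: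
--                     exec_list.append(keyword)
--                 else:
--                     nomal_regex.append(keyword)
--
--             else:
--                 dhfa_keyword.append(keyword)
--         return_list.append("|".join(nomal_regex))
--         return_list.append("|".join(scdbg_list))
--
--
--
--         for exec in exec_list:
--             return_list.append(exec)
--
--         for key in dhfa_keyword:
--             return_list.append(key)
--
--         return return_list
--     elif _type == "OLE":
--         nomal_regex = []
--         exec_list = []
--         dhfa_keyword = []  # domain, http, filepath, ascii
--
--         for keyword in _list:
--             if not (keyword == "domain" or keyword == "filepath" or keyword == "ascii"):
--                 nomal_regex.append(keyword)
--             else: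
--                 dhfa_keyword.append(keyword)
--         return_list.append("|".join(nomal_regex))
--
--         for exec in exec_list:
--             return_list.append(exec)
--
--         for key in dhfa_keyword:
--             return_list.append(key)
--
--         return return_list
-- ===== SOURCE B (Python) =====
-- def set_regex(_list, _type="HWP"):
--     # B: one reversed pass that builds the joined strings incrementally (no buckets + join)
--     if _type == "HWP":
--         nomal = None
--         scdbg = None
--         execs = []
--         dhfa = []
--         for k in reversed(_list):
--             if k in ("domain", "filepath", "ascii"):
--                 dhfa.append(k)
--             elif "string" in k or "putinterval" in k or "repeat" in k:
--                 scdbg = k if scdbg is None else k + "|" + scdbg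
--             elif "exec|" in k:
--                 execs.append(k)
--             else:
--                 nomal = k if nomal is None else k + "|" + nomal
--         execs.reverse()
--         dhfa.reverse()
--         return [("" if nomal is None else nomal), ("" if scdbg is None else scdbg)] + execs + dhfa
--     elif _type == "OLE":
--         nomal = None
--         dhfa = []
--         for k in reversed(_list):
--             if k in ("domain", "filepath", "ascii"):
--                 dhfa.append(k)
--             else:
--                 nomal = k if nomal is None else k + "|" + nomal
--         dhfa.reverse()
--         return [("" if nomal is None else nomal)] + dhfa
-- ===== Notes on version B (the rewrite author's own statement) =====
-- stated objective: alternative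
-- what changed: Instead of A's bucket lists plus a final '|'.join, B makes one right-to-left pass over the list and builds the two joined regex strings incrementally (prepending k + '|' onto an optional accumulator), collecting exec/dhfa keywords reversed and flipping them once at the end.
import Mathlib
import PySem

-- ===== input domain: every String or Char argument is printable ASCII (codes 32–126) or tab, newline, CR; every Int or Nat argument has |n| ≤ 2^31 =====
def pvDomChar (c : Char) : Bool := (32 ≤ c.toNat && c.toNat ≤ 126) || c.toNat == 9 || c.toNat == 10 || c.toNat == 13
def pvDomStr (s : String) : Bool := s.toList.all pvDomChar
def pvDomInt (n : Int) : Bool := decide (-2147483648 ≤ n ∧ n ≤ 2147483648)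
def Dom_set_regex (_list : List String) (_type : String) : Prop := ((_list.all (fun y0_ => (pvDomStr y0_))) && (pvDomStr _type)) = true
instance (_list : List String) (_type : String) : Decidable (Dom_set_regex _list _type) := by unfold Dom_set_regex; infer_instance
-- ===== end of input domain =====

-- B replaces A's bucket-lists-then-join pass by one right-to-left pass that builds the joined
-- strings incrementally and flips the exec/dhfa accumulators once at the end (objective: alternative).

-- ===== PORT A =====
-- A's HWP loop body: append keyword to one of the four buckets (nomal, scdbg, exec, dhfa) by branch priority.
def pvHwpStep (st : List String × List String × List String × List String) (keyword : String) :
    List String × List String × List String × List String :=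
  if !(keyword == "domain" || keyword == "filepath" || keyword == "ascii") then
    if PySem.Str.isIn "string" keyword || PySem.Str.isIn "putinterval" keyword
        || PySem.Str.isIn "repeat" keyword then
      (st.1, st.2.1 ++ [keyword], st.2.2.1, st.2.2.2)
    else if PySem.Str.isIn "exec|" keyword then
      (st.1, st.2.1, st.2.2.1 ++ [keyword], st.2.2.2)
    else
      (st.1 ++ [keyword], st.2.1, st.2.2.1, st.2.2.2)
  else
    (st.1, st.2.1, st.2.2.1, st.2.2.2 ++ [keyword])

-- A's OLE loop body (exec_list stays empty, as in the Python).
def pvOleStep (st : List String × List String × List String) (keyword : String) :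
    List String × List String × List String :=
  if !(keyword == "domain" || keyword == "filepath" || keyword == "ascii") then
    (st.1 ++ [keyword], st.2.1, st.2.2)
  else
    (st.1, st.2.1, st.2.2 ++ [keyword])

def set_regex (_list : List String) (_type : String) : Option (List String) :=
  if _type == "HWP" then
    let st := _list.foldl pvHwpStep ([], [], [], [])
    some ([PySem.Str.join "|" st.1, PySem.Str.join "|" st.2.1] ++ st.2.2.1 ++ st.2.2.2)
  else if _type == "OLE" then
    let st := _list.foldl pvOleStep ([], [], [])
    some ([PySem.Str.join "|" st.1] ++ st.2.1 ++ st.2.2)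
  else
    none

-- ===== PORT B =====
-- Source B's HWP loop body (iterating reversed(_list)): prepend k (with a '|') onto the optional
-- joined-string accumulators, or append k to the reversed exec/dhfa accumulators.
def pvAltHwpStep (st : Option (List Char) × Option (List Char) × List String × List String)
    (k : String) : Option (List Char) × Option (List Char) × List String × List String :=
  if k == "domain" || k == "filepath" || k == "ascii" then
    (st.1, st.2.1, st.2.2.1, st.2.2.2 ++ [k])
  else if PySem.Str.isIn "string" k || PySem.Str.isIn "putinterval" k
      || PySem.Str.isIn "repeat" k then
    (st.1, some (match st.2.1 with | none => k.toList | some s => k.toList ++ ['|'] ++ s),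
     st.2.2.1, st.2.2.2)
  else if PySem.Str.isIn "exec|" k then
    (st.1, st.2.1, st.2.2.1 ++ [k], st.2.2.2)
  else
    (some (match st.1 with | none => k.toList | some s => k.toList ++ ['|'] ++ s),
     st.2.1, st.2.2.1, st.2.2.2)

-- Source B's OLE loop body (iterating reversed(_list)).
def pvAltOleStep (st : Option (List Char) × List String) (k : String) :
    Option (List Char) × List String :=
  if k == "domain" || k == "filepath" || k == "ascii" then
    (st.1, st.2 ++ [k])
  else
    (some (match st.1 with | none => k.toList | some s => k.toList ++ ['|'] ++ s), st.2)

-- '"" if x is None else x'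
def pvOfOpt : Option (List Char) → String
  | none => ""
  | some cs => String.ofList cs

def set_regex_alt (_list : List String) (_type : String) : Option (List String) :=
  if _type == "HWP" then
    let st := _list.reverse.foldl pvAltHwpStep (none, none, [], [])
    some ([pvOfOpt st.1, pvOfOpt st.2.1] ++ st.2.2.1.reverse ++ st.2.2.2.reverse)
  else if _type == "OLE" then
    let st := _list.reverse.foldl pvAltOleStep (none, [])
    some ([pvOfOpt st.1] ++ st.2.reverse)
  else
    none

-- ===== PRECONDITION & SPEC =====
def Spec_set_regex (_list : List String) (_type : String) (out : Option (List String)) : Prop := out = set_regex_alt _list _type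
instance (_list : List String) (_type : String) (out : Option (List String)) : Decidable (Spec_set_regex _list _type out) := by unfold Spec_set_regex; infer_instance

-- ===== CLAIM (what is proved, stated in full; the proofs are below) =====
def Claim_equal_set_regex : Prop := ∀ (_list : List String) (_type : String), Dom_set_regex _list _type → Spec_set_regex _list _type (set_regex _list _type)

-- ===== LEMMAS AND PROOFS =====

def pvIsDhfa (k : String) : Bool := k == "domain" || k == "filepath" || k == "ascii"
def pvIsScdbg (k : String) : Bool :=
  PySem.Str.isIn "string" k || PySem.Str.isIn "putinterval" k || PySem.Str.isIn "repeat" k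

-- 'None' for the empty bucket, otherwise the joined string as a char list
def pvJoinOpt : List String → Option (List Char)
  | [] => none
  | (h :: t) => some (PySem.Chars.join ['|'] ((h :: t).map String.toList))

theorem pvJoinOpt_cons (h : String) (t : List String) :
    pvJoinOpt (h :: t)
    = some (match pvJoinOpt t with | none => h.toList | some s => h.toList ++ ['|'] ++ s) := by
  cases t with
  | nil => simp [pvJoinOpt, PySem.Chars.join_singleton]
  | cons a as => simp [pvJoinOpt, PySem.Chars.join_cons_cons]

theorem pvOfOpt_joinOpt (l : List String) : pvOfOpt (pvJoinOpt l) = PySem.Str.join "|" l := by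
  cases l with
  | nil => decide
  | cons h t =>
    have hsep : "|".toList = ['|'] := rfl
    simp [pvJoinOpt, pvOfOpt, PySem.Str.join, hsep]

theorem hwp_fold (l : List String) (n s e d : List String) :
    l.foldl pvHwpStep (n, s, e, d)
    = (n ++ (l.filter (fun k => !pvIsDhfa k)).filter
              (fun k => !pvIsScdbg k && !PySem.Str.isIn "exec|" k),
       s ++ (l.filter (fun k => !pvIsDhfa k)).filter pvIsScdbg,
       e ++ (l.filter (fun k => !pvIsDhfa k)).filter
              (fun k => !pvIsScdbg k && PySem.Str.isIn "exec|" k),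
       d ++ l.filter pvIsDhfa) := by
  induction l generalizing n s e d with
  | nil => simp
  | cons h t ih =>
    rw [List.foldl_cons]
    by_cases hd : pvIsDhfa h
    · have hstep : pvHwpStep (n, s, e, d) h = (n, s, e, d ++ [h]) := by
        have : (h == "domain" || h == "filepath" || h == "ascii") = true := hd
        simp [pvHwpStep, this]
      rw [hstep, ih]
      simp [hd]
    · have h2 : (h == "domain" || h == "filepath" || h == "ascii") = false := by
        simpa [pvIsDhfa] using hd
      by_cases hs : pvIsScdbg h
      · have hstep : pvHwpStep (n, s, e, d) h = (n, s ++ [h], e, d) := by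
          have hb : (PySem.Str.isIn "string" h || PySem.Str.isIn "putinterval" h
              || PySem.Str.isIn "repeat" h) = true := hs
          unfold pvHwpStep
          rw [h2, hb]
          simp
        rw [hstep, ih]
        simp [hd, hs]
      · have h3 : (PySem.Str.isIn "string" h || PySem.Str.isIn "putinterval" h
            || PySem.Str.isIn "repeat" h) = false := by
          simpa [pvIsScdbg] using hs
        by_cases he : PySem.Str.isIn "exec|" h
        · have hstep : pvHwpStep (n, s, e, d) h = (n, s, e ++ [h], d) := by
            unfold pvHwpStep
            rw [h2, h3, he]
            simp
          rw [hstep, ih]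
          simp_all
        · have he' : PySem.Str.isIn "exec|" h = false := by simpa using he
          have hstep : pvHwpStep (n, s, e, d) h = (n ++ [h], s, e, d) := by
            unfold pvHwpStep
            rw [h2, h3, he']
            simp
          rw [hstep, ih]
          simp_all

theorem ole_fold (l : List String) (n e d : List String) :
    l.foldl pvOleStep (n, e, d)
    = (n ++ l.filter (fun k => !pvIsDhfa k), e, d ++ l.filter pvIsDhfa) := by
  induction l generalizing n e d with
  | nil => simp
  | cons h t ih =>
    rw [List.foldl_cons]
    by_cases hd : pvIsDhfa h
    · have hstep : pvOleStep (n, e, d) h = (n, e, d ++ [h]) := by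
        have : (h == "domain" || h == "filepath" || h == "ascii") = true := hd
        simp [pvOleStep, this]
      rw [hstep, ih]
      simp [hd]
    · have h2 : (h == "domain" || h == "filepath" || h == "ascii") = false := by
        simpa [pvIsDhfa] using hd
      have hstep : pvOleStep (n, e, d) h = (n ++ [h], e, d) := by
        unfold pvOleStep
        rw [h2]
        simp
      rw [hstep, ih]
      simp [hd]

theorem alt_hwp_fold (l : List String) :
    l.reverse.foldl pvAltHwpStep (none, none, [], [])
    = (pvJoinOpt ((l.filter (fun k => !pvIsDhfa k)).filter
          (fun k => !pvIsScdbg k && !PySem.Str.isIn "exec|" k)),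
       pvJoinOpt ((l.filter (fun k => !pvIsDhfa k)).filter pvIsScdbg),
       ((l.filter (fun k => !pvIsDhfa k)).filter
          (fun k => !pvIsScdbg k && PySem.Str.isIn "exec|" k)).reverse,
       (l.filter pvIsDhfa).reverse) := by
  induction l with
  | nil => simp [pvJoinOpt]
  | cons h t ih =>
    rw [List.reverse_cons, List.foldl_append, ih, List.foldl_cons, List.foldl_nil]
    by_cases hd : pvIsDhfa h
    · have h1 : (h == "domain" || h == "filepath" || h == "ascii") = true := hd
      simp [pvAltHwpStep, h1, hd]
    · have h2 : (h == "domain" || h == "filepath" || h == "ascii") = false := by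
        simpa [pvIsDhfa] using hd
      by_cases hs : pvIsScdbg h
      · have hb : (PySem.Str.isIn "string" h || PySem.Str.isIn "putinterval" h
            || PySem.Str.isIn "repeat" h) = true := hs
        unfold pvAltHwpStep
        rw [h2, hb]
        simp [hd, hs, pvJoinOpt_cons]
      · have h3 : (PySem.Str.isIn "string" h || PySem.Str.isIn "putinterval" h
            || PySem.Str.isIn "repeat" h) = false := by
          simpa [pvIsScdbg] using hs
        by_cases he : PySem.Str.isIn "exec|" h
        · unfold pvAltHwpStep
          rw [h2, h3, he]
          simp_all
        · have he' : PySem.Str.isIn "exec|" h = false := by simpa using he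
          unfold pvAltHwpStep
          rw [h2, h3, he']
          simp_all [pvJoinOpt_cons]

theorem alt_ole_fold (l : List String) :
    l.reverse.foldl pvAltOleStep (none, [])
    = (pvJoinOpt (l.filter (fun k => !pvIsDhfa k)), (l.filter pvIsDhfa).reverse) := by
  induction l with
  | nil => simp [pvJoinOpt]
  | cons h t ih =>
    rw [List.reverse_cons, List.foldl_append, ih, List.foldl_cons, List.foldl_nil]
    by_cases hd : pvIsDhfa h
    · have h1 : (h == "domain" || h == "filepath" || h == "ascii") = true := hd
      simp [pvAltOleStep, h1, hd]
    · have h2 : (h == "domain" || h == "filepath" || h == "ascii") = false := by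
        simpa [pvIsDhfa] using hd
      unfold pvAltOleStep
      rw [h2]
      simp [hd, pvJoinOpt_cons]

-- ===== VERDICT (by name: the statement is the Claim_ definition above) =====
theorem set_regex_spec : Claim_equal_set_regex := by
  intro _list _type _hdom
  unfold Spec_set_regex set_regex set_regex_alt
  by_cases h1 : _type == "HWP"
  · simp only [h1, if_pos, hwp_fold, alt_hwp_fold]
    simp [pvOfOpt_joinOpt]
  · by_cases h2 : _type == "OLE"
    · simp only [h1, h2, Bool.false_eq_true, if_false, if_true, ole_fold, alt_ole_fold]
      simp [pvOfOpt_joinOpt]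
    · simp [h1, h2]
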